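-- pv_equiv track=rewrite | github.com/May-Xiaoting-Zhou/Leetcode | Google/2460_Apply_Operations_to_an_Array.py | applyOperations
-- ===== SOURCE A (Python) =====
-- from typing import List
--
-- def applyOperations(nums: List[int]) -> List[int]:
--     n = len(nums)
--     write_index = 0  # Pointer to place non-zero elements
--
--     for index in range(n):
--         # Step 1: Merge adjacent equal elements if they are non-zero
--         if (
--             index < n - 1
--             and nums[index] == nums[index + 1]
--             and nums[index] != 0
--         ):
--             nums[index] *= 2
--             nums[index + 1] = 0
--         # Step 2: Shift non-zero elements to the front
--         if nums[index] != 0: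
--             if index != write_index:
--                 nums[index], nums[write_index] = (
--                     nums[write_index],
--                     nums[index],
--                 )
--             write_index += 1
--     return nums
-- ===== SOURCE B (Python) =====
-- from typing import List
--
-- def applyOperations(nums: List[int]) -> List[int]:
--     n = len(nums)
--     merged = list(nums)
--     # Pass 1: merge adjacent equal non-zero elements
--     for i in range(n - 1):
--         if merged[i] != 0 and merged[i] == merged[i + 1]:
--             merged[i] *= 2
--             merged[i + 1] = 0
--     # Pass 2: compact non-zeros to the front, pad with zeros, write back in place
--     nonzero = [x for x in merged if x != 0]
--     nums[:] = nonzero + [0] * (n - len(nonzero))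
--     return nums
-- ===== Notes on version B (the rewrite author's own statement) =====
-- stated objective: simpler
-- what changed: A merges and compacts in one interleaved loop with a two-pointer swap; B does a plain merge pass first, then rebuilds the list as the non-zero elements followed by zero padding.
import Mathlib
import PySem

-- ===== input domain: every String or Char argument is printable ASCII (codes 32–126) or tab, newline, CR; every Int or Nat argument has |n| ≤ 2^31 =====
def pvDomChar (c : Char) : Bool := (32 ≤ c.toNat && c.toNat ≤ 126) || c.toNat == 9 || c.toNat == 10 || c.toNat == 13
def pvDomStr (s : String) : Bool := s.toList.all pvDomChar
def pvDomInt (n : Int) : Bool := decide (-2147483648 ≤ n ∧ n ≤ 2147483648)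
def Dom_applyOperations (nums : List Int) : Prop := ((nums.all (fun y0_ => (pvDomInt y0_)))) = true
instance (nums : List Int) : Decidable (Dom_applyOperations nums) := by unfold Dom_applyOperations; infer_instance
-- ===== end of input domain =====

-- B replaces A's single interleaved merge-and-two-pointer-swap loop by two plain passes
-- (merge, then filter non-zeros and pad with zeros); both mutate the argument in place in
-- Python and the equivalence proved here is about the returned (= final) list content.

-- ===== PORT A =====
-- A's for-loop over range(n) as structural recursion on the index; list indexing is
-- List.getD (exact here: every index A uses is in range, so Python never raises).
def pvALoop (n : Nat) (st : List Int × Nat) (index : Nat) : List Int × Nat :=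
  if _h : index < n then
    let nums := st.1
    let w := st.2
    let nums1 :=
      if index < n - 1 ∧ nums.getD index 0 = nums.getD (index + 1) 0 ∧ nums.getD index 0 ≠ 0
      then (nums.set index (nums.getD index 0 * 2)).set (index + 1) 0
      else nums
    let st' :=
      if nums1.getD index 0 ≠ 0 then
        (if index ≠ w then
          (nums1.set index (nums1.getD w 0)).set w (nums1.getD index 0)
         else nums1, w + 1)
      else (nums1, w)
    pvALoop n st' (index + 1)
  else st
termination_by n - index

def applyOperations (nums : List Int) : List Int :=
  (pvALoop nums.length (nums, 0) 0).1

-- ===== PORT B =====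
-- B's merge pass: for i in range(n-1), structural recursion on the index.
def pvBMerge (n : Nat) (merged : List Int) (i : Nat) : List Int :=
  if _h : i < n - 1 then
    let merged1 :=
      if merged.getD i 0 ≠ 0 ∧ merged.getD i 0 = merged.getD (i + 1) 0
      then (merged.set i (merged.getD i 0 * 2)).set (i + 1) 0
      else merged
    pvBMerge n merged1 (i + 1)
  else merged
termination_by n - 1 - i

def applyOperations_alt (nums : List Int) : List Int :=
  let n := nums.length
  let merged := pvBMerge n nums 0
  let nonzero := merged.filter (fun x => x ≠ 0)
  nonzero ++ List.replicate (n - nonzero.length) 0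

-- ===== PRECONDITION & SPEC =====
def Spec_applyOperations (nums : List Int) (out : List Int) : Prop := out = applyOperations_alt nums
instance (nums : List Int) (out : List Int) : Decidable (Spec_applyOperations nums out) := by unfold Spec_applyOperations; infer_instance

-- ===== CLAIM (what is proved, stated in full; the proofs are below) =====
def Claim_equal_applyOperations : Prop := ∀ (nums : List Int), Dom_applyOperations nums → Spec_applyOperations nums (applyOperations nums)

-- ===== LEMMAS AND PROOFS =====

-- Ghost specification: the sequential adjacent-merge pass, as structural recursion.
def pvMrg : List Int → List Int
  | [] => []
  | [x] => [x]
  | x :: y :: t => if x ≠ 0 ∧ x = y then (x * 2) :: pvMrg (0 :: t) else x :: pvMrg (y :: t)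
termination_by l => l.length

theorem pvMrg_length : ∀ (l : List Int), (pvMrg l).length = l.length := by
  intro l
  induction l using pvMrg.induct <;> simp [pvMrg] <;> split <;> simp_all

theorem getD_append_len (p u : List Int) (d : Int) : (p ++ u).getD p.length d = u.getD 0 d := by
  simp [List.getD, List.getElem?_append_right]

theorem getD_append_len1 (p u : List Int) (d : Int) :
    (p ++ u).getD (p.length + 1) d = u.getD 1 d := by
  simp [List.getD, List.getElem?_append_right]

theorem set_append_len (p u : List Int) (v : Int) :
    (p ++ u).set p.length v = p ++ u.set 0 v := by
  induction p with
  | nil => simp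
  | cons a p ih => simp [ih]

theorem pvBMerge_inv (u p : List Int) (n : Nat) (hn : n = p.length + u.length) :
    pvBMerge n (p ++ u) p.length = p ++ pvMrg u := by
  induction u using pvMrg.induct generalizing p with
  | case1 =>
      rw [pvBMerge, dif_neg (by simp at hn; omega)]
      simp [pvMrg]
  | case2 x =>
      rw [pvBMerge, dif_neg (by simp at hn; omega)]
      simp [pvMrg]
  | case3 x y t hc ih =>
      obtain ⟨hx0, hxy⟩ := hc
      subst hxy
      have hlt : p.length < n - 1 := by simp at hn; omega
      rw [pvBMerge, dif_pos hlt]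
      simp only [getD_append_len, getD_append_len1, List.getD_cons_zero, List.getD_cons_succ]
      rw [if_pos (by simp [hx0]), set_append_len, List.set_cons_zero]
      have hset : (p ++ x * 2 :: x :: t).set (p.length + 1) 0 = (p ++ [x * 2]) ++ 0 :: t := by
        have h := set_append_len (p ++ [x * 2]) (x :: t) 0
        simpa using h
      rw [hset]
      have h := ih (p ++ [x * 2]) (by simp at hn ⊢; omega)
      rw [show (p ++ [x * 2]).length = p.length + 1 from by simp] at h
      rw [h, pvMrg, if_pos (by simp [hx0])]
      simp
  | case4 x y t hc ih =>
      have hlt : p.length < n - 1 := by simp at hn; omega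
      rw [pvBMerge, dif_pos hlt]
      simp only [getD_append_len, getD_append_len1, List.getD_cons_zero, List.getD_cons_succ]
      rw [if_neg (by tauto)]
      have h := ih (p ++ [x]) (by simp at hn ⊢; omega)
      rw [show (p ++ [x]).length = p.length + 1 from by simp] at h
      rw [show p ++ x :: y :: t = (p ++ [x]) ++ y :: t from by simp, h]
      rw [pvMrg, if_neg (by tauto)]
      simp

theorem getD_mid (np : List Int) (z : Nat) (u : List Int) (d : Int) :
    (np ++ List.replicate z 0 ++ u).getD (np.length + z) d = u.getD 0 d := by
  have h := getD_append_len (np ++ List.replicate z 0) u d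
  simpa using h

theorem getD_mid1 (np : List Int) (z : Nat) (u : List Int) (d : Int) :
    (np ++ List.replicate z 0 ++ u).getD (np.length + z + 1) d = u.getD 1 d := by
  have h := getD_append_len1 (np ++ List.replicate z 0) u d
  simpa using h

theorem getD_w (np : List Int) (z : Nat) (u : List Int) (d : Int) (hz : 0 < z) :
    (np ++ List.replicate z 0 ++ u).getD np.length d = 0 := by
  obtain ⟨zz, rfl⟩ : ∃ zz, z = zz + 1 := ⟨z - 1, by omega⟩
  have h := getD_append_len np (List.replicate (zz + 1) 0 ++ u) d
  simpa using h

theorem set_mid (np : List Int) (z : Nat) (u : List Int) (v : Int) :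
    (np ++ List.replicate z 0 ++ u).set (np.length + z) v
      = np ++ List.replicate z 0 ++ u.set 0 v := by
  simp only [List.set_append, List.length_append, List.length_replicate]
  have h1 : np.length + z - (np.length + z) = 0 := by omega
  rw [h1]
  simp

theorem set_mid1 (np : List Int) (z : Nat) (a : Int) (u : List Int) (v : Int) :
    (np ++ List.replicate z 0 ++ a :: u).set (np.length + z + 1) v
      = np ++ List.replicate z 0 ++ a :: u.set 0 v := by
  simp only [List.set_append, List.length_append, List.length_replicate]
  have h1 : np.length + z + 1 - (np.length + z) = 1 := by omega
  rw [h1]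
  simp

theorem set_w (np : List Int) (zz : Nat) (u : List Int) (v : Int) :
    (np ++ List.replicate (zz + 1) 0 ++ u).set np.length v
      = (np ++ [v]) ++ List.replicate zz 0 ++ u := by
  induction np with
  | nil => simp [List.replicate_succ]
  | cons b np ih => simpa using ih

theorem zeros_shift (z : Nat) (t : List Int) :
    List.replicate z (0:Int) ++ 0 :: t = List.replicate (z + 1) 0 ++ t := by
  simp [List.replicate_succ', List.append_assoc]

theorem shift_shape (np : List Int) (z : Nat) (x : Int) (t : List Int) :
    (if (np ++ List.replicate z 0 ++ x :: t).getD (np.length + z) 0 ≠ 0 then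
       (if np.length + z ≠ np.length then
          ((np ++ List.replicate z 0 ++ x :: t).set (np.length + z)
              ((np ++ List.replicate z 0 ++ x :: t).getD np.length 0)).set np.length
            ((np ++ List.replicate z 0 ++ x :: t).getD (np.length + z) 0)
        else np ++ List.replicate z 0 ++ x :: t, np.length + 1)
     else (np ++ List.replicate z 0 ++ x :: t, np.length))
    = if x = 0 then (np ++ List.replicate (z + 1) 0 ++ t, np.length)
      else ((np ++ [x]) ++ List.replicate z 0 ++ t, np.length + 1) := by
  rw [getD_mid, List.getD_cons_zero]
  by_cases hx : x = 0
  · subst hx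
    simp [zeros_shift, List.append_assoc]
  · rw [if_pos hx, if_neg hx]
    obtain ⟨zz, rfl⟩ | rfl : (∃ zz, z = zz + 1) ∨ z = 0 := by
      rcases z with _ | zz
      · exact Or.inr rfl
      · exact Or.inl ⟨zz, rfl⟩
    · rw [if_pos (by omega), getD_w np _ _ _ (by omega), set_mid, List.set_cons_zero, set_w]
      simp [zeros_shift, List.append_assoc]
    · simp [List.append_assoc]

theorem pvALoop_inv (u np : List Int) (z : Nat) (n : Nat)
    (hn : n = np.length + z + u.length) :
    (pvALoop n (np ++ List.replicate z 0 ++ u, np.length) (np.length + z)).1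
      = np ++ (pvMrg u).filter (fun x => x ≠ 0)
           ++ List.replicate (z + ((pvMrg u).countP (fun x => decide (x = 0)))) 0 := by
  induction u using pvMrg.induct generalizing np z with
  | case1 =>
      rw [pvALoop, dif_neg (by simp at hn; omega)]
      simp [pvMrg]
  | case2 x =>
      rw [pvALoop, dif_pos (by simp at hn; omega)]
      simp only [getD_mid, getD_mid1, List.getD_cons_zero, List.getD_cons_succ]
      rw [if_neg (show ¬(np.length + z < n - 1 ∧ x = List.getD [] 0 0 ∧ x ≠ 0) from by
        rintro ⟨h1, -, -⟩; simp at hn; omega)]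
      rw [shift_shape]
      by_cases hx : x = 0
      · subst hx
        rw [if_pos rfl, pvALoop, dif_neg (by simp at hn; omega)]
        simp [pvMrg]
      · rw [if_neg hx, pvALoop, dif_neg (by simp at hn; omega)]
        simp [pvMrg, hx, List.append_assoc]
  | case3 x y t hc ih =>
      obtain ⟨hx0, hxy⟩ := hc
      subst hxy
      rw [pvALoop, dif_pos (by simp at hn; omega)]
      simp only [getD_mid, getD_mid1, List.getD_cons_zero, List.getD_cons_succ]
      rw [if_pos (show np.length + z < n - 1 ∧ True ∧ x ≠ 0 from
        ⟨by simp at hn; omega, trivial, hx0⟩)]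
      rw [set_mid, List.set_cons_zero, set_mid1, List.set_cons_zero]
      rw [shift_shape]
      rw [if_neg (show ¬(x * 2 = 0) from by omega)]
      have h := ih (np ++ [x * 2]) z (by simp at hn ⊢; omega)
      rw [show (np ++ [x * 2]).length = np.length + 1 from by simp] at h
      rw [show np.length + z + 1 = np.length + 1 + z from by omega, h, pvMrg, if_pos ⟨hx0, rfl⟩]
      have h2 : x * 2 ≠ 0 := by omega
      simp [h2, List.append_assoc]
  | case4 x y t hc ih =>
      rw [pvALoop, dif_pos (by simp at hn; omega)]
      simp only [getD_mid, getD_mid1, List.getD_cons_zero, List.getD_cons_succ]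
      rw [if_neg (show ¬(np.length + z < n - 1 ∧ x = y ∧ x ≠ 0) from by
        rintro ⟨-, h2, h3⟩; exact hc ⟨h3, h2⟩)]
      rw [shift_shape]
      by_cases hx : x = 0
      · subst hx
        rw [if_pos rfl]
        have h := ih np (z + 1) (by simp at hn ⊢; omega)
        rw [show np.length + z + 1 = np.length + (z + 1) from by omega, h, pvMrg, if_neg hc]
        simp only [List.filter_cons, List.countP_cons]
        rw [show (z + 1) + List.countP (fun x => decide (x = 0)) (pvMrg (y :: t))
              = z + (List.countP (fun x => decide (x = 0)) (pvMrg (y :: t)) + 1) from by omega]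
        simp
      · rw [if_neg hx]
        have h := ih (np ++ [x]) z (by simp at hn ⊢; omega)
        rw [show (np ++ [x]).length = np.length + 1 from by simp] at h
        rw [show np.length + z + 1 = np.length + 1 + z from by omega, h, pvMrg, if_neg hc]
        simp [hx, List.append_assoc]

theorem filter_count (m : List Int) :
    (m.filter (fun x => x ≠ 0)).length + m.countP (fun x => decide (x = 0)) = m.length := by
  induction m with
  | nil => simp
  | cons a t ih =>
      by_cases h : a = 0 <;>
        simp [h, ne_eq, decide_not] at ih ⊢ <;> omega

theorem mrg_count_split (l : List Int) :
    ((pvMrg l).filter (fun x => x ≠ 0)).length + (pvMrg l).countP (fun x => decide (x = 0))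
      = l.length := by
  rw [← pvMrg_length l]
  exact filter_count _

-- ===== VERDICT (by name: the statement is the Claim_ definition above) =====
theorem applyOperations_spec : Claim_equal_applyOperations := by
  intro nums _
  simp only [Spec_applyOperations, applyOperations, applyOperations_alt]
  have hA := pvALoop_inv nums [] 0 nums.length (by simp)
  simp only [List.replicate, List.nil_append, List.length_nil, Nat.zero_add] at hA
  rw [hA]
  have hB := pvBMerge_inv nums [] nums.length (by simp)
  simp only [List.nil_append, List.length_nil] at hB
  rw [hB]
  have hc := mrg_count_split nums
  congr 1
  congr 1
  omega
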